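-- pv_equiv track=rewrite | github.com/pypi-data/pypi-mirror-365 | packages/cvequery/cvequery-1.0.6.post1-py3-none-any.whl/src/formatting.py | _is_field_alias
-- ===== SOURCE A (Python) =====
-- def _is_field_alias(field_name: str, exclude_field: str) -> bool:
--     """Check if field names are aliases of each other."""
--     # Define field aliases
--     aliases = {
--         'summary': ['description', 'desc'],
--         'cvss': ['cvssv3', 'cvss_v3', 'cvssv30'],
--         'cvssv2': ['cvss_v2', 'cvss2'],
--         'epss': ['epsscore'],
--         'published': ['publishedtime', 'published_time', 'pubdate'],
--         'modified': ['modifiedtime', 'modified_time', 'moddate'],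
--         'kev': ['kevstatus', 'kev_status'],
--         'ransomware': ['ransomwarecampaign', 'ransomware_campaign'],
--         'proposeaction': ['proposed_action', 'propose_action', 'mitigation'],
--         'references': ['refs', 'reference'],
--         'cpes': ['affectedproducts', 'affected_products', 'products']
--     }
--
--     # Check if either field is an alias of the other
--     for main_field, field_aliases in aliases.items():
--         if ((field_name == main_field and exclude_field in field_aliases) or
--             (exclude_field == main_field and field_name in field_aliases) or
--             (field_name in field_aliases and exclude_field in field_aliases)):
--             return True
--
--     return False
-- ===== SOURCE B (Python) =====
-- # Flat lookup table: field name -> (group id, is_main_field).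
-- # Two names are aliases iff they share a group id, except that a group's
-- # main field is never an alias of itself (while an alias name is).
-- _FIELD_INFO = {
--     'summary': (0, True), 'description': (0, False), 'desc': (0, False),
--     'cvss': (1, True), 'cvssv3': (1, False), 'cvss_v3': (1, False), 'cvssv30': (1, False),
--     'cvssv2': (2, True), 'cvss_v2': (2, False), 'cvss2': (2, False),
--     'epss': (3, True), 'epsscore': (3, False),
--     'published': (4, True), 'publishedtime': (4, False), 'published_time': (4, False), 'pubdate': (4, False),
--     'modified': (5, True), 'modifiedtime': (5, False), 'modified_time': (5, False), 'moddate': (5, False),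
--     'kev': (6, True), 'kevstatus': (6, False), 'kev_status': (6, False),
--     'ransomware': (7, True), 'ransomwarecampaign': (7, False), 'ransomware_campaign': (7, False),
--     'proposeaction': (8, True), 'proposed_action': (8, False), 'propose_action': (8, False), 'mitigation': (8, False),
--     'references': (9, True), 'refs': (9, False), 'reference': (9, False),
--     'cpes': (10, True), 'affectedproducts': (10, False), 'affected_products': (10, False), 'products': (10, False),
-- }
--
--
-- def _is_field_alias(field_name: str, exclude_field: str) -> bool:
--     """Check if field names are aliases of each other."""
--     fi = _FIELD_INFO.get(field_name)
--     ei = _FIELD_INFO.get(exclude_field)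
--     if fi is None or ei is None:
--         return False
--     return fi[0] == ei[0] and not (fi[1] and ei[1])
-- ===== Notes on version B (the rewrite author's own statement) =====
-- stated objective: alternative
-- what changed: B replaces A's per-call scan over the nested alias groups by a flat precomputed table mapping each name to a (group id, is_main) pair, so the body is two dict lookups plus a group-id comparison (same group, not both mains) instead of a loop over groups with three membership tests each.
import Mathlib
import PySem

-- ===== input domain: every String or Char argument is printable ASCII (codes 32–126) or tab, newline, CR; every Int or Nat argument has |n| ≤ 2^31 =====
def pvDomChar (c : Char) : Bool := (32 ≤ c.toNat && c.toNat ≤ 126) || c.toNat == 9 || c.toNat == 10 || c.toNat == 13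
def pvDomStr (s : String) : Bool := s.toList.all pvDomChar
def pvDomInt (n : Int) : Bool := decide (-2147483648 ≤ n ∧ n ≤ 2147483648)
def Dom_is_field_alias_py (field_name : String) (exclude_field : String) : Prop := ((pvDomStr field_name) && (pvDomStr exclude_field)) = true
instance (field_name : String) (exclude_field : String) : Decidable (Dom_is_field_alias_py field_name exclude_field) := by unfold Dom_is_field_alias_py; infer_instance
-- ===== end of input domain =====

-- B replaces A's per-call scan over the nested alias groups by a flat table mapping each
-- name to a (group id, is_main) pair; the body is two lookups plus a group-id comparison.

-- ===== PORT A =====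
-- the dict literal `aliases` inside A, as an insertion-ordered association list
def pvAliasesA : List (String × List String) :=
  [("summary", ["description", "desc"]),
   ("cvss", ["cvssv3", "cvss_v3", "cvssv30"]),
   ("cvssv2", ["cvss_v2", "cvss2"]),
   ("epss", ["epsscore"]),
   ("published", ["publishedtime", "published_time", "pubdate"]),
   ("modified", ["modifiedtime", "modified_time", "moddate"]),
   ("kev", ["kevstatus", "kev_status"]),
   ("ransomware", ["ransomwarecampaign", "ransomware_campaign"]),
   ("proposeaction", ["proposed_action", "propose_action", "mitigation"]),
   ("references", ["refs", "reference"]),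
   ("cpes", ["affectedproducts", "affected_products", "products"])]

-- A's `for main_field, field_aliases in aliases.items():` loop with its early `return True`
def pvLoopA (field_name exclude_field : String) : List (String × List String) → Bool
  | [] => false
  | (main_field, field_aliases) :: rest =>
    if ((field_name == main_field && field_aliases.contains exclude_field) ||
        (exclude_field == main_field && field_aliases.contains field_name) ||
        (field_aliases.contains field_name && field_aliases.contains exclude_field)) then
      true
    else
      pvLoopA field_name exclude_field rest

def is_field_alias_py (field_name : String) (exclude_field : String) : Bool :=
  pvLoopA field_name exclude_field pvAliasesA

-- ===== PORT B =====
-- Source B's module-level _FIELD_INFO dict literal: name -> (group id, is_main), as an assoc list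
def pvFieldInfo : List (String × Int × Bool) :=
  [("summary", 0, true), ("description", 0, false), ("desc", 0, false),
   ("cvss", 1, true), ("cvssv3", 1, false), ("cvss_v3", 1, false), ("cvssv30", 1, false),
   ("cvssv2", 2, true), ("cvss_v2", 2, false), ("cvss2", 2, false),
   ("epss", 3, true), ("epsscore", 3, false),
   ("published", 4, true), ("publishedtime", 4, false), ("published_time", 4, false), ("pubdate", 4, false),
   ("modified", 5, true), ("modifiedtime", 5, false), ("modified_time", 5, false), ("moddate", 5, false),
   ("kev", 6, true), ("kevstatus", 6, false), ("kev_status", 6, false),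
   ("ransomware", 7, true), ("ransomwarecampaign", 7, false), ("ransomware_campaign", 7, false),
   ("proposeaction", 8, true), ("proposed_action", 8, false), ("propose_action", 8, false), ("mitigation", 8, false),
   ("references", 9, true), ("refs", 9, false), ("reference", 9, false),
   ("cpes", 10, true), ("affectedproducts", 10, false), ("affected_products", 10, false), ("products", 10, false)]

-- dict.get(name) on the assoc list (keys are distinct; first match)
def pvInfoGet (name : String) : Option (Int × Bool) :=
  (pvFieldInfo.find? (fun p => p.1 == name)).map (fun p => p.2)

def is_field_alias_py_alt (field_name : String) (exclude_field : String) : Bool :=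
  match pvInfoGet field_name, pvInfoGet exclude_field with
  | some fi, some ei => fi.1 == ei.1 && !(fi.2 && ei.2)
  | _, _ => false

-- ===== PRECONDITION & SPEC =====
def Spec_is_field_alias_py (field_name : String) (exclude_field : String) (out : Bool) : Prop := out = is_field_alias_py_alt field_name exclude_field
instance (field_name : String) (exclude_field : String) (out : Bool) : Decidable (Spec_is_field_alias_py field_name exclude_field out) := by unfold Spec_is_field_alias_py; infer_instance

-- ===== CLAIM =====
def Claim_equal_is_field_alias_py : Prop := ∀ (field_name : String) (exclude_field : String), Dom_is_field_alias_py field_name exclude_field → Spec_is_field_alias_py field_name exclude_field (is_field_alias_py field_name exclude_field)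

-- ===== LEMMAS AND PROOFS =====
-- every name occurring in either program's table
def pvAllNames : List String := pvFieldInfo.map (fun p => p.1)

-- on the finitely many known names the two programs agree (checked by the kernel)
set_option maxRecDepth 4096 in
lemma pv_table :
    (pvAllNames.all (fun f => pvAllNames.all (fun e =>
      is_field_alias_py f e == is_field_alias_py_alt f e))) = true := by decide

lemma pvKeysA : (pvAliasesA.all (fun p => pvAllNames.contains p.1 && p.2.all (fun a => pvAllNames.contains a))) = true := by decide

-- if either argument is not a known name, A's loop never fires
lemma pvA_not_mem (f e : String) (h : f ∉ pvAllNames ∨ e ∉ pvAllNames) :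
    is_field_alias_py f e = false := by
  rw [is_field_alias_py]
  have loop : ∀ l : List (String × List String),
      (l.all (fun p => pvAllNames.contains p.1 && p.2.all (fun a => pvAllNames.contains a))) = true →
      pvLoopA f e l = false := by
    intro l hl
    induction l with
    | nil => rfl
    | cons p rest ih =>
      simp only [List.all_cons, Bool.and_eq_true] at hl
      obtain ⟨⟨hk, ha⟩, hrest⟩ := hl
      simp only [List.contains_eq_mem, decide_eq_true_eq, List.all_eq_true] at hk ha
      rw [pvLoopA]
      have hfire : ((f == p.1 && p.2.contains e) || (e == p.1 && p.2.contains f) ||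
          (p.2.contains f && p.2.contains e)) = false := by
        rcases h with h | h
        · have h1 : (f == p.1) = false := by
            simp only [beq_eq_false_iff_ne, ne_eq]; rintro rfl; exact h hk
          have h2 : (p.2.contains f) = false := by
            simp only [List.contains_eq_mem, decide_eq_false_iff_not]
            intro hm; exact h (by simpa using ha f hm)
          rw [h1, h2]; simp
        · have h1 : (e == p.1) = false := by
            simp only [beq_eq_false_iff_ne, ne_eq]; rintro rfl; exact h hk
          have h2 : (p.2.contains e) = false := by
            simp only [List.contains_eq_mem, decide_eq_false_iff_not]
            intro hm; exact h (by simpa using ha e hm)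
          rw [h1, h2]; simp
      rw [hfire]
      simp only [Bool.false_eq_true, if_false]
      exact ih hrest
  exact loop pvAliasesA pvKeysA

-- if a name is not in the table, its lookup is none
lemma pvGet_not_mem (x : String) (h : x ∉ pvAllNames) : pvInfoGet x = none := by
  rw [pvInfoGet]
  have : pvFieldInfo.find? (fun p => p.1 == x) = none := by
    apply List.find?_eq_none.mpr
    intro p hp
    simp only [beq_eq_false_iff_ne, ne_eq, Bool.not_eq_true]
    rintro rfl
    exact h (List.mem_map.mpr ⟨p, hp, rfl⟩)
  rw [this]; rfl

lemma pvB_not_mem (f e : String) (h : f ∉ pvAllNames ∨ e ∉ pvAllNames) :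
    is_field_alias_py_alt f e = false := by
  rw [is_field_alias_py_alt]
  rcases h with h | h
  · rw [pvGet_not_mem f h]
  · rw [pvGet_not_mem e h]
    cases pvInfoGet f with
    | none => rfl
    | some fi => rfl

-- ===== VERDICT =====
theorem is_field_alias_py_spec : Claim_equal_is_field_alias_py := by
  intro f e _
  unfold Spec_is_field_alias_py
  by_cases hf : f ∈ pvAllNames
  · by_cases he : e ∈ pvAllNames
    · have hh := List.all_eq_true.mp (List.all_eq_true.mp pv_table f hf) e he
      exact eq_of_beq hh
    · rw [pvA_not_mem f e (Or.inr he), pvB_not_mem f e (Or.inr he)]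
  · rw [pvA_not_mem f e (Or.inl hf), pvB_not_mem f e (Or.inl hf)]
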